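-- pv_equiv track=rewrite | github.com/CodingLeeSeungHoon/Python_Algorithm_TeamNote | BOJ_Solved/BOJ-13549.py | bfs
-- ===== SOURCE A (Python) =====
-- from collections import deque
--
-- def bfs(a, b):
--     queue = deque()
--     queue.append(a)
--     visited = [-1 for _ in range(100001)]
--     visited[a] = 0
--
--     while queue:
--         me = queue.popleft()
--         if me == b:
--             return visited[me]
--
--         if 0 <= me-1 < 100001 and visited[me-1] == -1:
--             visited[me-1] = visited[me] + 1
--             queue.append(me-1)
--
--         if 0 < me * 2 < 100001 and visited[me*2] == -1:
--             visited[me*2] = visited[me]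
--             queue.appendleft(me*2)
--
--         if 0 <= me + 1 < 100001 and visited[me+1] == -1:
--             visited[me+1] = visited[me] + 1
--             queue.append(me+1)
-- ===== SOURCE B (Python) =====
-- def bfs(a, b):
--     # Contract the zero-weight doubling edges: when a node is reached, walk its
--     # whole chain x, 2x, 4x, ... inline at the same distance.  What remains is a
--     # plain unit-cost breadth-first search over explicit per-distance frontier
--     # lists -- no deque, no 0-1 two-ended queue discipline.
--     dist = [-1] * 100001
--     dist[a] = 0
--     frontier = [a]
--     d = 0
--     while frontier:
--         nxt = []
--         for e in frontier:
--             x = e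
--             while True:
--                 if x == b:
--                     return d
--                 if 0 <= x - 1 < 100001 and dist[x - 1] == -1:
--                     dist[x - 1] = d + 1
--                     nxt.append(x - 1)
--                 y = x * 2
--                 extend = 0 < y < 100001 and dist[y] == -1
--                 if extend:
--                     dist[y] = d
--                 if 0 <= x + 1 < 100001 and dist[x + 1] == -1:
--                     dist[x + 1] = d + 1
--                     nxt.append(x + 1)
--                 if not extend:
--                     break
--                 x = y
--         frontier = nxt
--         d += 1
--     return None
-- ===== Notes on version B (the rewrite author's own statement) =====
-- stated objective: alternative
-- what changed: Eliminated the 0-1-weight deque search: B contracts the zero-weight doubling edges by walking each chain x,2x,4x,... inline in an inner loop, so the outer search is a textbook unit-cost level BFS over per-distance frontier lists, without a deque or any 0-1 two-ended queue discipline.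
import Mathlib
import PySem

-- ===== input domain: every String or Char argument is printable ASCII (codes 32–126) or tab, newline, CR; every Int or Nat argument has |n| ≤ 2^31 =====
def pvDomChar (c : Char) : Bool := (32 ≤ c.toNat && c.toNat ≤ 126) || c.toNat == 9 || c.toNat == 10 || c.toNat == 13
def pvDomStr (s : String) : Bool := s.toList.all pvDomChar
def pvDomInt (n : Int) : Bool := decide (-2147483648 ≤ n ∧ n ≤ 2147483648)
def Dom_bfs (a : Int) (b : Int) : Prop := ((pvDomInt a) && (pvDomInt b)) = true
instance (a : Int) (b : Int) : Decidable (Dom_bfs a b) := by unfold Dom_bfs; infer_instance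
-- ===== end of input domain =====

-- B contracts the zero-weight doubling edges (inner chain walk x, 2x, 4x, ...),
-- turning A's 0-1-weight deque search into a plain unit-cost level BFS over
-- per-distance frontier lists (objective: alternative; same return value).

-- ===== PORT A =====
-- Python list indexing visited[i] / visited[i] = v, exact for -len ≤ i < len
-- (Python raises IndexError outside that range; those inputs are excluded by Pre_bfs,
-- where the port reads a default / drops the write instead).
def pvWrap (n : Nat) (i : Int) : Int := if i < 0 then i + n else i

def pvReadA (vis : Array Int) (i : Int) : Int := (vis[(pvWrap vis.size i).toNat]?).getD (-1)

def pvWriteA (vis : Array Int) (i : Int) (v : Int) : Array Int :=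
  vis.set! (pvWrap vis.size i).toNat v

-- the body of A's while-loop after the popleft and the b-test (three ifs, in order)
def bfsStepA (me : Int) (q : List Int) (vis : Array Int) : List Int × Array Int :=
  let (q, vis) := if 0 ≤ me - 1 ∧ me - 1 < 100001 ∧ pvReadA vis (me - 1) = -1
      then (q ++ [me - 1], pvWriteA vis (me - 1) (pvReadA vis me + 1)) else (q, vis)
  let (q, vis) := if 0 < me * 2 ∧ me * 2 < 100001 ∧ pvReadA vis (me * 2) = -1
      then (me * 2 :: q, pvWriteA vis (me * 2) (pvReadA vis me)) else (q, vis)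
  let (q, vis) := if 0 ≤ me + 1 ∧ me + 1 < 100001 ∧ pvReadA vis (me + 1) = -1
      then (q ++ [me + 1], pvWriteA vis (me + 1) (pvReadA vis me + 1)) else (q, vis)
  (q, vis)

-- A's while-loop; deque as a List (popleft = head, append = ++ [x], appendleft = cons).
-- fuel 300000 exceeds the at most 100002 iterations any run performs (each pushed
-- node is freshly marked in visited, so pushes ≤ 100002).
def bfsLoopA (b : Int) : Nat → List Int → Array Int → Option Int
  | 0, _, _ => none
  | (f+1), q, vis =>
    match q with
    | [] => none
    | me :: rest =>
      if me = b then some (pvReadA vis me)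
      else
        let (q', vis') := bfsStepA me rest vis
        bfsLoopA b f q' vis'

def bfs (a : Int) (b : Int) : Option Int :=
  bfsLoopA b 300000 [a] (pvWriteA (Array.replicate 100001 (-1)) a 0)

-- ===== PORT B =====
-- B's loops as one fuel-structural recursion: each call is one iteration of
-- B's inner 'while True' on the current chain element x (one fuel tick per
-- chain-element visit; fuel 300000 exceeds the at most 100002 visits of any
-- run); at chain end the match on es/nxt is the 'for e in frontier' advance
-- and the outer level switch 'frontier = nxt; d += 1'.
def visitB (b : Int) : Nat → Int → List Int → List Int → Int → Array Int → Option Int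
  | 0, _, _, _, _, _ => none
  | (f+1), x, es, nxt, d, dist =>
    if x = b then some d
    else
      let (nxt, dist) := if 0 ≤ x - 1 ∧ x - 1 < 100001 ∧ pvReadA dist (x - 1) = -1
          then (nxt ++ [x - 1], pvWriteA dist (x - 1) (d + 1)) else (nxt, dist)
      let y := x * 2
      let extend := 0 < y ∧ y < 100001 ∧ pvReadA dist y = -1
      let dist := if extend then pvWriteA dist y d else dist
      let (nxt, dist) := if 0 ≤ x + 1 ∧ x + 1 < 100001 ∧ pvReadA dist (x + 1) = -1
          then (nxt ++ [x + 1], pvWriteA dist (x + 1) (d + 1)) else (nxt, dist)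
      if extend then visitB b f y es nxt d dist
      else
        match es with
        | e :: es' => visitB b f e es' nxt d dist
        | [] =>
          match nxt with
          | [] => none
          | e :: es' => visitB b f e es' [] (d + 1) dist

def bfs_alt (a : Int) (b : Int) : Option Int :=
  visitB b 300000 a [] [] 0 (pvWriteA (Array.replicate 100001 (-1)) a 0)

-- ===== PRECONDITION & SPEC =====
-- Pre_bfs is exactly A's return domain: 'visited[a] = 0' raises IndexError iff
-- a < -100001 or a > 100000 (Python negative indices wrap); A returns on everything else.
def Pre_bfs (a : Int) (b : Int) : Prop := -100001 ≤ a ∧ a ≤ 100000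
instance (a : Int) (b : Int) : Decidable (Pre_bfs a b) := by unfold Pre_bfs; infer_instance

def pvWitness_bfs : Int × Int := (5, 17)

def Spec_bfs (a : Int) (b : Int) (out : Option Int) : Prop := out = bfs_alt a b
instance (a : Int) (b : Int) (out : Option Int) : Decidable (Spec_bfs a b out) := by
  unfold Spec_bfs; infer_instance

-- ===== CLAIM (what is proved, stated in full; the proofs are below) =====
def Claim_equal_bfs : Prop := ∀ (a : Int) (b : Int), Dom_bfs a b → Pre_bfs a b → Spec_bfs a b (bfs a b)

-- ===== LEMMAS AND PROOFS =====
-- Simulation: A's deque at any moment is x :: (rest-of-frontier ++ nxt) — the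
-- appendleft'ed doubling x*2 is always popped immediately next, which is
-- exactly B's inline chain walk; both sides keep the identical visited array.

theorem size_pvWriteA (vA : Array Int) (i v : Int) : (pvWriteA vA i v).size = vA.size := by
  simp [pvWriteA]

theorem readA_writeA_of_ne {vA : Array Int} {y : Int} {v : Int} {x : Int}
    (hy : pvReadA vA y = -1) (hx : pvReadA vA x ≠ -1) :
    pvReadA (pvWriteA vA y v) x = pvReadA vA x := by
  have hne : (pvWrap vA.size y).toNat ≠ (pvWrap vA.size x).toNat := by
    intro he
    apply hx
    unfold pvReadA at hy ⊢
    rw [← he, hy]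
  unfold pvReadA pvWriteA
  rw [Array.size_set!, Array.set!_eq_setIfInBounds, Array.getElem?_setIfInBounds_ne hne]

-- preservation of a still-relevant distance value by a write into a fresh cell
theorem keepVal {vA : Array Int} {y v x d : Int}
    (hy : pvReadA vA y = -1) (hx : pvReadA vA x = d) (hd : d ≠ -1) :
    pvReadA (pvWriteA vA y v) x = d := by
  rw [readA_writeA_of_ne hy (by rw [hx]; exact hd)]; exact hx

theorem readA_writeA_self {vA : Array Int} {y v : Int}
    (h0 : 0 ≤ y) (h1 : y < (vA.size : Int)) :
    pvReadA (pvWriteA vA y v) y = v := by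
  have hw : pvWrap vA.size y = y := by unfold pvWrap; omega
  unfold pvReadA pvWriteA
  rw [Array.size_set!, hw, Array.set!_eq_setIfInBounds,
      Array.getElem?_setIfInBounds_self_of_lt (by omega)]
  rfl

-- a '±1 neighbour' stage of the loop body, seen on A's queue and on B's nxt
-- list at once: A appends y at the back of the whole queue, B at the back of
-- nxt, and both write the same value d+1 into the same shared array
theorem stage_pm (x y d : Int) (es nxt : List Int) (v : Array Int)
    (hsz : v.size = 100001) (hd : 0 ≤ d) (hx : pvReadA v x = d)
    (hes : ∀ e ∈ es, pvReadA v e = d) (hnxt : ∀ z ∈ nxt, pvReadA v z = d + 1) :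
    ∃ nxt' v',
      (if 0 ≤ y ∧ y < 100001 ∧ pvReadA v y = -1
        then ((es ++ nxt) ++ [y], pvWriteA v y (pvReadA v x + 1))
        else (es ++ nxt, v)) = (es ++ nxt', v') ∧
      (if 0 ≤ y ∧ y < 100001 ∧ pvReadA v y = -1
        then (nxt ++ [y], pvWriteA v y (d + 1)) else (nxt, v)) = (nxt', v') ∧
      v'.size = 100001 ∧ pvReadA v' x = d ∧
      (∀ e ∈ es, pvReadA v' e = d) ∧ (∀ z ∈ nxt', pvReadA v' z = d + 1) := by
  by_cases h : 0 ≤ y ∧ y < 100001 ∧ pvReadA v y = -1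
  · refine ⟨nxt ++ [y], pvWriteA v y (d + 1), ?_, ?_, ?_, ?_, ?_, ?_⟩
    · rw [if_pos h, hx]; simp
    · rw [if_pos h]
    · rw [size_pvWriteA, hsz]
    · exact keepVal h.2.2 hx (by omega)
    · exact fun e he => keepVal h.2.2 (hes e he) (by omega)
    · intro z hz
      rcases List.mem_append.mp hz with hz' | hz'
      · exact keepVal h.2.2 (hnxt z hz') (by omega)
      · rcases List.mem_singleton.mp hz' with rfl
        exact readA_writeA_self h.1 (by rw [hsz]; exact_mod_cast h.2.1)
  · exact ⟨nxt, v, by rw [if_neg h], by rw [if_neg h], hsz, hx, hes, hnxt⟩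

theorem loopA_nil (b : Int) (f : Nat) (v : Array Int) : bfsLoopA b f [] v = none := by
  cases f <;> rfl

theorem loop_sim (b : Int) (f : Nat) :
    ∀ (x : Int) (es nxt : List Int) (d : Int) (v : Array Int),
    v.size = 100001 → 0 ≤ d → pvReadA v x = d →
    (∀ e ∈ es, pvReadA v e = d) → (∀ z ∈ nxt, pvReadA v z = d + 1) →
    bfsLoopA b f (x :: (es ++ nxt)) v = visitB b f x es nxt d v := by
  induction f with
  | zero => intro x es nxt d v _ _ _ _ _; rfl
  | succ f IH =>
    intro x es nxt d v hsz hd hx hes hnxt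
    simp only [bfsLoopA, visitB]
    by_cases hb : x = b
    · rw [if_pos hb, if_pos hb, hx]
    · rw [if_neg hb, if_neg hb]
      simp only [bfsStepA]
      obtain ⟨nxt1, v1, e1A, e1B, hsz1, hx1, hes1, hnxt1⟩ :=
        stage_pm x (x - 1) d es nxt v hsz hd hx hes hnxt
      rw [e1A, e1B]
      dsimp only
      by_cases h2 : 0 < x * 2 ∧ x * 2 < 100001 ∧ pvReadA v1 (x * 2) = -1
      · -- the chain extends: A pops the appendleft'ed x*2 next, B walks to it
        rw [if_pos h2, if_pos h2, if_pos h2, hx1]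
        have hself : pvReadA (pvWriteA v1 (x * 2) d) (x * 2) = d :=
          readA_writeA_self (by omega) (by rw [hsz1]; exact_mod_cast h2.2.1)
        obtain ⟨nxt3, v3, e3A, e3B, hsz3, hx3, hes3, hnxt3⟩ :=
          stage_pm x (x + 1) d (x * 2 :: es) nxt1 (pvWriteA v1 (x * 2) d)
            (by rw [size_pvWriteA, hsz1]) hd
            (keepVal h2.2.2 hx1 (by omega))
            (by
              intro e he
              rcases List.mem_cons.mp he with rfl | he'
              · exact hself
              · exact keepVal h2.2.2 (hes1 e he') (by omega))
            (fun z hz => keepVal h2.2.2 (hnxt1 z hz) (by omega))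
        rw [← List.cons_append, e3A, e3B]
        dsimp only
        rw [List.cons_append]
        exact IH (x * 2) es nxt3 d v3 hsz3 hd (hes3 (x * 2) (List.mem_cons_self ..))
          (fun e he => hes3 e (List.mem_cons_of_mem _ he)) hnxt3
      · -- chain ends: A pops the next frontier entry / switches level, like B
        rw [if_neg h2, if_neg h2, if_neg h2]
        obtain ⟨nxt3, v3, e3A, e3B, hsz3, hx3, hes3, hnxt3⟩ :=
          stage_pm x (x + 1) d es nxt1 v1 hsz1 hd hx1 hes1 hnxt1
        rw [e3A, e3B]
        dsimp only
        match es, hes3 with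
        | e :: es', hes3 =>
          exact IH e es' nxt3 d v3 hsz3 hd (hes3 e (List.mem_cons_self ..))
            (fun e' he' => hes3 e' (List.mem_cons_of_mem _ he')) hnxt3
        | [], _ =>
          match nxt3, hnxt3 with
          | [], _ => exact loopA_nil b f v3
          | e :: es', hnxt3 =>
            have h := IH e es' [] (d + 1) v3 hsz3 (by omega)
              (hnxt3 e (List.mem_cons_self ..))
              (fun e' he' => hnxt3 e' (List.mem_cons_of_mem _ he'))
              (by intro z hz; cases hz)
            simpa using h

-- reading back the initial mark (wraparound form: a may be negative under Pre_bfs)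
theorem readA_init (a : Int)
    (h0 : 0 ≤ pvWrap 100001 a) (h1 : pvWrap 100001 a < 100001) :
    pvReadA (pvWriteA (Array.replicate 100001 (-1 : Int)) a 0) a = 0 := by
  have hlt : (pvWrap (Array.replicate 100001 (-1 : Int)).size a).toNat
      < (Array.replicate 100001 (-1 : Int)).size := by
    simp only [Array.size_replicate]; omega
  unfold pvReadA pvWriteA
  rw [Array.set!_eq_setIfInBounds, Array.size_setIfInBounds,
      Array.getElem?_setIfInBounds_self_of_lt hlt]
  rfl

-- ===== VERDICT (by name: the statement is the Claim_ definition above) =====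
theorem bfs_spec : Claim_equal_bfs := by
  intro a b _ hpre
  unfold Spec_bfs bfs bfs_alt
  obtain ⟨hp1, hp2⟩ := hpre
  have hw0 : 0 ≤ pvWrap 100001 a := by unfold pvWrap; split <;> omega
  have hw1 : pvWrap 100001 a < 100001 := by unfold pvWrap; split <;> omega
  have h := loop_sim b 300000 a [] [] 0
    (pvWriteA (Array.replicate 100001 (-1)) a 0)
    (by rw [size_pvWriteA, Array.size_replicate])
    le_rfl
    (readA_init a hw0 hw1)
    (by intro e he; cases he)
    (by intro z hz; cases hz)
  simpa using h
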